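-- pv_equiv track=rewrite | github.com/eshun4/Data-Structures-and-Algorithms-in-Python-2024 | Sliding Window/max_consecutive_with_k_boosts.py | max_consecutive_with_k_boosts
-- ===== SOURCE A (Python) =====
-- def max_consecutive_with_k_boosts(sales, k):
--     # create left pointer
--     left = 0
--     # create max days
--     max_days = 0
--     # iterate through the array
--     for i in range(len(sales)):
--         # since good day is val >= 10 subtract 10 val from 10 and set to current val in arr. If val is less than 0 repalce with 0
--         curr_cost = max(0, 10 - sales[i])
--         sales[i] = curr_cost
--
--     # Next use two pointer technique to keep track of costs
--     # create sumCosts variable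
--     sumCost = 0
--     # iterate through sales
--     for right in range(len(sales)):
--         sumCost += sales[right]
--
--         while sumCost > k:
--             sumCost -= sales[left]
--             left += 1
--
--         curr_wind = right - left + 1
--         max_days = max(curr_wind, max_days)
--
--     # return the maximum number of days
--     return max_days
-- ===== SOURCE B (Python) =====
-- def max_consecutive_with_k_boosts(sales, k):
--     # in-place boost-cost transformation, same observable mutation as A
--     for i in range(len(sales)):
--         sales[i] = max(0, 10 - sales[i])
--     # non-shrinking window: the window [left, right] never shrinks; at the end
--     # its size len(sales) - left equals the longest window with cost sum <= k
--     left = 0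
--     s = 0
--     for c in sales:
--         s += c
--         if s > k:
--             s -= sales[left]
--             left += 1
--     return len(sales) - left
-- ===== Notes on version B (the rewrite author's own statement) =====
-- stated objective: alternative
-- what changed: Replaced A's shrinking two-pointer window (inner while loop plus a running max_days) by the non-shrinking-window technique: a single if moves left at most once per element, no max is tracked, and the answer is read off as len(sales) - left.
import Mathlib
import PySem

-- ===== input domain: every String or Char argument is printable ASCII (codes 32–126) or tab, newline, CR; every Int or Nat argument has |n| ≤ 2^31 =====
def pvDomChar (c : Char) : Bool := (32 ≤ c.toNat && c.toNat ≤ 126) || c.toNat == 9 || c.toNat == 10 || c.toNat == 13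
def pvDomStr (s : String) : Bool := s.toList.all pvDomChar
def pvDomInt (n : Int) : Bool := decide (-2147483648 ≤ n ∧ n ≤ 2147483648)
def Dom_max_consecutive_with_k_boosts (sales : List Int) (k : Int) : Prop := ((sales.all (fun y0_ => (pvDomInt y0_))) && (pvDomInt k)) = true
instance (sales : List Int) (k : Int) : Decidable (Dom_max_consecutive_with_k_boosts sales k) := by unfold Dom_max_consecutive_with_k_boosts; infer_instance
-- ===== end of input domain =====

-- B replaces A's shrinking window (inner while + running max) by a non-shrinking window
-- returning len(sales) - left; same O(n) cost, different invariant (objective: alternative).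
-- A mutates `sales` in place (B performs the same mutation); the equivalence proved here is
-- about the return value only.

-- ===== PORT A =====
-- index lemma needed by pvShrink's termination proof
theorem pvShrink_lt {costs : List Int} {i : Nat} {c : Int}
    (h : PySem.List.pyGet? costs (i : Int) = some c) : i < costs.length := by
  simp only [PySem.List.pyGet?_natCast] at h
  exact (List.getElem?_eq_some_iff.mp h).1

-- the inner `while sumCost > k:` loop of A
def pvShrink (costs : List Int) (k : Int) (left : Nat) (sumCost : Int) : Nat × Int :=
  if k < sumCost then
    match h : PySem.List.pyGet? costs (left : Int) with
    | some c => pvShrink costs k (left + 1) (sumCost - c)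
    | none => (left, sumCost)  -- Python raises IndexError here; unreachable under Pre_
  else (left, sumCost)
termination_by costs.length - left
decreasing_by have := pvShrink_lt h; omega

-- one iteration of A's `for right in range(len(sales))` loop; state (left, sumCost, max_days)
def pvStepA (costs : List Int) (k : Int) (st : Nat × Int × Int) (right : Nat) : Nat × Int × Int :=
  let sumCost := st.2.1 + (PySem.List.pyGet? costs (right : Int)).getD 0  -- in range: right < len
  let ls := pvShrink costs k st.1 sumCost
  (ls.1, ls.2, max ((right : Int) - ls.1 + 1) st.2.2)

def max_consecutive_with_k_boosts (sales : List Int) (k : Int) : Int :=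
  let sales1 := sales.map (fun v => max 0 (10 - v))   -- the first loop: sales[i] = max(0, 10 - sales[i])
  ((List.range sales1.length).foldl (pvStepA sales1 k) (0, 0, 0)).2.2

-- ===== PORT B =====
-- one iteration of B's `for c in sales` loop; state (left, s)
def pvStepB (boosted : List Int) (k : Int) (st : Nat × Int) (c : Int) : Nat × Int :=
  let s := st.2 + c
  if k < s then (st.1 + 1, s - (PySem.List.pyGet? boosted (st.1 : Int)).getD 0)  -- in range: left < len
  else (st.1, s)

def max_consecutive_with_k_boosts_alt (sales : List Int) (k : Int) : Int :=
  let boosted := sales.map (fun v => max 0 (10 - v))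
  (boosted.length : Int) - ((boosted.foldl (pvStepB boosted k) (0, 0)).1 : Int)

-- ===== PRECONDITION & SPEC =====
-- Pre_ excludes exactly the inputs (nonempty sales with k < 0) on which A's inner while loop
-- runs `left` past the end of the list and raises IndexError.
def Pre_max_consecutive_with_k_boosts (sales : List Int) (k : Int) : Prop := sales = [] ∨ 0 ≤ k
instance (sales : List Int) (k : Int) : Decidable (Pre_max_consecutive_with_k_boosts sales k) := by
  unfold Pre_max_consecutive_with_k_boosts; infer_instance

def pvWitness_max_consecutive_with_k_boosts : List Int × Int := ([12, 3, 10, 5], 7)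

def Spec_max_consecutive_with_k_boosts (sales : List Int) (k : Int) (out : Int) : Prop := out = max_consecutive_with_k_boosts_alt sales k
instance (sales : List Int) (k : Int) (out : Int) : Decidable (Spec_max_consecutive_with_k_boosts sales k out) := by unfold Spec_max_consecutive_with_k_boosts; infer_instance

-- ===== CLAIM (what is proved, stated in full; the proofs are below) =====
def Claim_equal_max_consecutive_with_k_boosts : Prop := ∀ (sales : List Int) (k : Int), Dom_max_consecutive_with_k_boosts sales k → Pre_max_consecutive_with_k_boosts sales k → Spec_max_consecutive_with_k_boosts sales k (max_consecutive_with_k_boosts sales k)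


-- ===== LEMMAS AND PROOFS =====

-- pvS c l r = sum of the window c[l:r]
def pvS (c : List Int) (l r : Nat) : Int := ((c.take r).drop l).sum

theorem pvS_zero_of_le (c : List Int) {l r : Nat} (h : r ≤ l) : pvS c l r = 0 := by
  unfold pvS
  rw [List.drop_eq_nil_of_le (by simp [List.length_take]; omega)]
  simp

theorem pvS_succ (c : List Int) {l r : Nat} (h1 : l ≤ r) (h2 : r < c.length) :
    pvS c l (r + 1) = pvS c l r + c.getD r 0 := by
  unfold pvS
  rw [List.take_add_one, List.getElem?_eq_getElem h2]
  rw [List.drop_append_of_le_length (by simp [List.length_take]; omega)]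
  simp [List.getD, List.getElem?_eq_getElem h2]

theorem pvS_cons (c : List Int) {l r : Nat} (h1 : l < r) (h2 : r ≤ c.length) :
    pvS c l r = c.getD l 0 + pvS c (l + 1) r := by
  unfold pvS
  have hl : l < (c.take r).length := by simp [List.length_take]; omega
  rw [List.drop_eq_getElem_cons hl]
  simp [List.getElem_take, List.getD, List.getElem?_eq_getElem (by omega : l < c.length)]

theorem pvS_nonneg (c : List Int) (hc : ∀ x ∈ c, 0 ≤ x) (l r : Nat) : 0 ≤ pvS c l r := by
  apply List.sum_nonneg
  intro x hx
  exact hc x (List.mem_of_mem_take (List.mem_of_mem_drop hx))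

theorem pvGetD_nonneg (c : List Int) (hc : ∀ x ∈ c, 0 ≤ x) {i : Nat} (h : i < c.length) :
    0 ≤ c.getD i 0 := by
  rw [List.getD_eq_getElem c 0 h]
  exact hc _ (List.getElem_mem h)

theorem pvS_anti (c : List Int) (hc : ∀ x ∈ c, 0 ≤ x) {l l' r : Nat}
    (hr : r ≤ c.length) (h : l ≤ l') : pvS c l' r ≤ pvS c l r := by
  induction l', h using Nat.le_induction with
  | base => exact le_rfl
  | succ n hn ih =>
    by_cases hlt : n < r
    · calc pvS c (n + 1) r ≤ pvS c n r := by
            rw [pvS_cons c hlt hr]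
            have := pvGetD_nonneg c hc (by omega : n < c.length)
            omega
        _ ≤ pvS c l r := ih
    · rw [pvS_zero_of_le c (by omega : r ≤ n + 1)]
      exact pvS_nonneg c hc l r

theorem pvShrink_spec (c : List Int) (k : Int) (hk : 0 ≤ k)
    (R : Nat) (hR : R ≤ c.length) :
    ∀ d la, la ≤ R → R - la ≤ d →
      ∃ l', pvShrink c k la (pvS c la R) = (l', pvS c l' R) ∧
        la ≤ l' ∧ l' ≤ R ∧ pvS c l' R ≤ k ∧ ∀ j, la ≤ j → j < l' → k < pvS c j R := by
  intro d
  induction d with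
  | zero =>
    intro la hla hd
    have hEq : la = R := by omega
    subst hEq
    rw [pvS_zero_of_le c le_rfl]
    rw [pvShrink, if_neg (by omega)]
    exact ⟨la, by rw [pvS_zero_of_le c le_rfl], le_rfl, le_rfl, by
      rw [pvS_zero_of_le c le_rfl]; exact hk, fun j h1 h2 => absurd (lt_of_le_of_lt h1 h2) (lt_irrefl _)⟩
  | succ d ih =>
    intro la hla hd
    by_cases hlt : k < pvS c la R
    · have hlaR : la < R := by
        by_contra hcon
        rw [pvS_zero_of_le c (by omega)] at hlt
        omega
      have hget : PySem.List.pyGet? c (la : Int) = some (c.getD la 0) := by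
        simp only [PySem.List.pyGet?_natCast]
        simp [List.getD, List.getElem?_eq_getElem (by omega : la < c.length)]
      have hrec : pvS c la R - c.getD la 0 = pvS c (la + 1) R := by
        rw [pvS_cons c hlaR hR]; ring
      rw [pvShrink, if_pos hlt]
      split
      case _ c1 hsome =>
        rw [hget] at hsome
        injection hsome with hsome
        subst hsome
        rw [hrec]
        obtain ⟨l', heq, h1, h2, h3, h4⟩ := ih (la + 1) (by omega) (by omega)
        exact ⟨l', heq, by omega, h2, h3, fun j hj1 hj2 => by
          rcases Nat.eq_or_lt_of_le hj1 with h | h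
          · subst h; exact hlt
          · exact h4 j h hj2⟩
      case _ hnone =>
        rw [hget] at hnone
        exact absurd hnone (by simp)
    · rw [pvShrink, if_neg hlt]
      exact ⟨la, rfl, le_rfl, hla, le_of_not_gt hlt, fun j h1 h2 => by omega⟩

-- the simulation invariant between A's state (la, sa, m) and B's state (lb, sb)
theorem pvInv (c : List Int) (k : Int) (hk : 0 ≤ k) (hc : ∀ x ∈ c, 0 ≤ x) :
    ∀ r, r ≤ c.length →
    ∃ la sa m lb sb,
      (List.range r).foldl (pvStepA c k) (0, 0, 0) = (la, sa, m) ∧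
      (c.take r).foldl (pvStepB c k) (0, 0) = (lb, sb) ∧
      la ≤ r ∧ lb ≤ la ∧ sa = pvS c la r ∧ sb = pvS c lb r ∧ sa ≤ k ∧
      (la = 0 ∨ k < pvS c (la - 1) r) ∧ m = (r : Int) - lb := by
  intro r
  induction r with
  | zero =>
    intro _
    exact ⟨0, 0, 0, 0, 0, rfl, rfl, le_rfl, le_rfl,
      (pvS_zero_of_le c le_rfl).symm, (pvS_zero_of_le c le_rfl).symm, hk, Or.inl rfl, by simp⟩
  | succ r ih =>
    intro hr1
    have hrlen : r < c.length := by omega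
    obtain ⟨la, sa, m, lb, sb, hA, hB, hlar, hlb, hsa, hsb, hsak, hmin, hm⟩ := ih (by omega)
    -- unfold one step of each fold
    have hArec : (List.range (r + 1)).foldl (pvStepA c k) (0, 0, 0) = pvStepA c k (la, sa, m) r := by
      rw [List.range_succ, List.foldl_append, hA]; rfl
    have hBrec : (c.take (r + 1)).foldl (pvStepB c k) (0, 0) = pvStepB c k (lb, sb) (c.getD r 0) := by
      rw [List.take_add_one, List.getElem?_eq_getElem hrlen, List.foldl_append, hB]
      simp [List.getD, List.getElem?_eq_getElem hrlen]
    have hgetr : (PySem.List.pyGet? c (r : Int)).getD 0 = c.getD r 0 := by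
      simp only [PySem.List.pyGet?_natCast]; rfl
    have hsum : sa + c.getD r 0 = pvS c la (r + 1) := by
      rw [hsa, pvS_succ c hlar hrlen]
    obtain ⟨l', hsh, hl1, hl2, hl3, hl4⟩ :=
      pvShrink_spec c k hk (r + 1) (by omega) (r + 1) la (by omega) (by omega)
    have hAstep : pvStepA c k (la, sa, m) r =
        (l', pvS c l' (r + 1), max ((r : Int) - l' + 1) m) := by
      unfold pvStepA
      simp only [hgetr, hsum, hsh]
    have hsbr : sb + c.getD r 0 = pvS c lb (r + 1) := by
      rw [hsb, pvS_succ c (by omega) hrlen]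
    by_cases hcs : k < sb + c.getD r 0
    · -- B moves left once
      have hgetlb : (PySem.List.pyGet? c (lb : Int)).getD 0 = c.getD lb 0 := by
        simp only [PySem.List.pyGet?_natCast]; rfl
      have hBstep : pvStepB c k (lb, sb) (c.getD r 0) = (lb + 1, pvS c (lb + 1) (r + 1)) := by
        unfold pvStepB
        simp only [hgetlb, if_pos hcs]
        rw [hsbr, pvS_cons c (by omega : lb < r + 1) (by omega)]
        ring_nf
      -- l' ≥ lb + 1
      have hl5 : lb + 1 ≤ l' := by
        by_contra hcon
        have : pvS c lb (r + 1) ≤ pvS c l' (r + 1) :=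
          pvS_anti c hc (by omega) (by omega)
        rw [← hsbr] at this
        omega
      refine ⟨l', pvS c l' (r + 1), max ((r : Int) - l' + 1) m, lb + 1, pvS c (lb + 1) (r + 1),
        by rw [hArec, hAstep], by rw [hBrec, hBstep], hl2, hl5, rfl, rfl, hl3, ?_, ?_⟩
      · rcases Nat.eq_or_lt_of_le hl1 with h | h
        · -- l' = la : old minimality grows to r+1
          rcases hmin with h0 | hlt
          · exact Or.inl (by omega)
          · right
            have hlam1 : la - 1 ≤ r := by omega
            rw [← h, pvS_succ c (by omega) hrlen]
            have := pvGetD_nonneg c hc hrlen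
            omega
        · exact Or.inr (by
            have := hl4 (l' - 1) (by omega) (by omega)
            exact this)
      · -- m' = m
        have hle : (r : Int) - l' + 1 ≤ m := by
          rw [hm]
          have : (lb : Int) + 1 ≤ (l' : Int) := by exact_mod_cast hl5
          omega
        rw [max_eq_right hle, hm]
        push_cast
        omega
    · -- B keeps left
      have hBstep : pvStepB c k (lb, sb) (c.getD r 0) = (lb, pvS c lb (r + 1)) := by
        unfold pvStepB
        simp only [if_neg hcs]
        rw [hsbr]
      -- lb = la
      have hlab : lb = la := by
        rcases Nat.eq_or_lt_of_le hlb with h | h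
        · exact h
        · exfalso
          rcases hmin with h0 | hlt
          · omega
          · have h1 : pvS c (la - 1) r ≤ pvS c lb r :=
              pvS_anti c hc (by omega) (by omega)
            have h2 : pvS c lb r ≤ pvS c lb (r + 1) := by
              rw [pvS_succ c (by omega) hrlen]
              have := pvGetD_nonneg c hc hrlen
              omega
            rw [← hsbr] at h2
            omega
      -- l' = la
      have hl'la : l' = la := by
        rcases Nat.eq_or_lt_of_le hl1 with h | h
        · omega
        · exfalso
          have := hl4 la le_rfl h
          rw [← hlab, ← hsbr] at this
          omega
      refine ⟨l', pvS c l' (r + 1), max ((r : Int) - l' + 1) m, lb, pvS c lb (r + 1),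
        by rw [hArec, hAstep], by rw [hBrec, hBstep], by omega, by omega, rfl, rfl, hl3, ?_, ?_⟩
      · rcases hmin with h0 | hlt
        · exact Or.inl (by omega)
        · right
          rw [hl'la, pvS_succ c (by omega : la - 1 ≤ r) hrlen]
          have := pvGetD_nonneg c hc hrlen
          omega
      · have hge : m ≤ (r : Int) - l' + 1 := by
          rw [hm, hl'la, ← hlab]
          omega
        rw [max_eq_left hge, hl'la, ← hlab]
        push_cast
        omega

-- ===== VERDICT (by name: the statement is the Claim_ definition above) =====
theorem max_consecutive_with_k_boosts_spec : Claim_equal_max_consecutive_with_k_boosts := by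
  intro sales k _ hpre
  unfold Spec_max_consecutive_with_k_boosts
  rcases hpre with hnil | hk
  · subst hnil
    simp [max_consecutive_with_k_boosts, max_consecutive_with_k_boosts_alt]
  · set c := sales.map (fun v => max 0 (10 - v)) with hcdef
    have hc : ∀ x ∈ c, 0 ≤ x := by
      intro x hx
      rcases List.mem_map.mp hx with ⟨v, _, hv⟩
      rw [← hv]; exact le_max_left _ _
    obtain ⟨la, sa, m, lb, sb, hA, hB, _, _, _, _, _, _, hm⟩ :=
      pvInv c k hk hc c.length le_rfl
    rw [List.take_length] at hB
    unfold max_consecutive_with_k_boosts max_consecutive_with_k_boosts_alt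
    dsimp only
    rw [← hcdef, hA, hB, hm]
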